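-- pv_equiv track=rewrite | github.com/kanishkapg/RAG_chatbot_v1 | debug_supersedes.py | category_matches
-- ===== SOURCE A (Python) =====
-- def category_matches(target_paths, candidate_paths):
--     for t in target_paths:
--         for c in candidate_paths:
--             if not isinstance(t, list) or not isinstance(c, list):
--                 continue
--             t_norm = [p.lower() for p in t]
--             c_norm = [p.lower() for p in c]
--             if len(c_norm) <= len(t_norm) and t_norm[:len(c_norm)] == c_norm:
--                 return True
--             if len(t_norm) <= len(c_norm) and c_norm[:len(t_norm)] == t_norm:
--                 return True
--     return False
-- ===== SOURCE B (Python) =====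
-- def category_matches(target_paths, candidate_paths):
--     # Index the candidates once: the set of full normalized candidates and the
--     # set of all their prefixes; then each target is answered by set lookups.
--     full = set()
--     prefixes = set()
--     for c in candidate_paths:
--         if not isinstance(c, list):
--             continue
--         cn = tuple(p.lower() for p in c)
--         full.add(cn)
--         for i in range(len(cn) + 1):
--             prefixes.add(cn[:i])
--     for t in target_paths:
--         if not isinstance(t, list):
--             continue
--         tn = tuple(p.lower() for p in t)
--         if tn in prefixes:
--             return True
--         for i in range(len(tn) + 1):
--             if tn[:i] in full:
--                 return True
--     return False
-- ===== Notes on version B (the rewrite author's own statement) =====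
-- stated objective: faster
-- what changed: Instead of comparing every target against every candidate, B normalizes the candidates once into two hash sets (full candidates and all their prefixes) and answers each target by set lookups on its prefixes.
import Mathlib
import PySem

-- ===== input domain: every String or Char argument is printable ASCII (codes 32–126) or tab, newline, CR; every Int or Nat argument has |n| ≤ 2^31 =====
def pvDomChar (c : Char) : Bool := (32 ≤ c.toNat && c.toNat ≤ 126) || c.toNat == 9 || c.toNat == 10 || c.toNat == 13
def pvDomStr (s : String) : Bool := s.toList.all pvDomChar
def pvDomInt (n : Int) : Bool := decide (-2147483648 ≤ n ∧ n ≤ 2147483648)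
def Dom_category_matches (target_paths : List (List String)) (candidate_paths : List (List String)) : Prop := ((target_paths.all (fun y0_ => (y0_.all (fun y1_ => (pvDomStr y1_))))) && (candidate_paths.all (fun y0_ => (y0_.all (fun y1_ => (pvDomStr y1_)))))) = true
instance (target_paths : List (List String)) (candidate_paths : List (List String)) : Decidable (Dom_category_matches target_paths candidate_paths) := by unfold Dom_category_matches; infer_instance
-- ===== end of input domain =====

-- B replaces A's nested scan over all target×candidate pairs by a one-time set index of the
-- normalized candidates and of all their prefixes, answering each target by set lookups (objective: faster).

-- ===== PORT A =====
-- literal port of A's double loop with early return; the isinstance guards are vacuous at this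
-- type (every element IS a list), so the `continue` branch never fires and is omitted.
def category_matches (target_paths : List (List String)) (candidate_paths : List (List String)) : Bool :=
  target_paths.any (fun t =>
    candidate_paths.any (fun c =>
      let t_norm := t.map PySem.Str.lower
      let c_norm := c.map PySem.Str.lower
      (decide (c_norm.length ≤ t_norm.length) &&
        (PySem.List.slice t_norm none (some (c_norm.length : Int)) == c_norm)) ||
      (decide (t_norm.length ≤ c_norm.length) &&
        (PySem.List.slice c_norm none (some (t_norm.length : Int)) == t_norm))))

-- ===== PORT B =====
def pvNorm (p : List String) : List String := p.map PySem.Str.lower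

-- builds (full, prefixes): the set of normalized candidates and the set of all their prefixes
def pvIndex (candidate_paths : List (List String)) :
    PySem.Set (List String) × PySem.Set (List String) :=
  candidate_paths.foldl (fun acc c =>
    let cn := pvNorm c
    let full := PySem.Set.add acc.1 cn
    let prefixes := (PySem.List.pyRange 0 ((cn.length : Int) + 1) 1).foldl
        (fun s i => PySem.Set.add s (PySem.List.slice cn none (some i))) acc.2
    (full, prefixes)) (PySem.Set.empty, PySem.Set.empty)

def category_matches_alt (target_paths : List (List String)) (candidate_paths : List (List String)) : Bool :=
  let idx := pvIndex candidate_paths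
  target_paths.any (fun t =>
    let tn := pvNorm t
    PySem.Set.contains idx.2 tn ||
      (PySem.List.pyRange 0 ((tn.length : Int) + 1) 1).any
        (fun i => PySem.Set.contains idx.1 (PySem.List.slice tn none (some i))))

-- ===== PRECONDITION & SPEC =====
def Spec_category_matches (target_paths : List (List String)) (candidate_paths : List (List String)) (out : Bool) : Prop := out = category_matches_alt target_paths candidate_paths
instance (target_paths : List (List String)) (candidate_paths : List (List String)) (out : Bool) : Decidable (Spec_category_matches target_paths candidate_paths out) := by unfold Spec_category_matches; infer_instance

-- ===== CLAIM (what is proved, stated in full; the proofs are below) =====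
def Claim_equal_category_matches : Prop := ∀ (target_paths : List (List String)) (candidate_paths : List (List String)), Dom_category_matches target_paths candidate_paths → Spec_category_matches target_paths candidate_paths (category_matches target_paths candidate_paths)

-- ===== LEMMAS AND PROOFS =====

-- membership in a foldl of Set.add of images
theorem mem_foldl_add {α β : Type} [BEq α] [LawfulBEq α] (f : β → α) (l : List β)
    (s : PySem.Set α) (x : α) :
    x ∈ l.foldl (fun s a => PySem.Set.add s (f a)) s ↔ x ∈ s ∨ ∃ a ∈ l, f a = x := by
  induction l generalizing s with
  | nil => simp
  | cons b bs ih =>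
      simp [List.foldl_cons, ih, PySem.Set.mem_add]
      tauto

-- a take with its length bound is exactly a prefix
theorem take_eq_iff_prefix {α : Type} (x l : List α) :
    (l.take x.length = x) ↔ x <+: l := by
  constructor
  · intro h
    exact h ▸ List.take_prefix _ _
  · intro h
    obtain ⟨r, rfl⟩ := h
    simp

theorem slice_prefix_iff (cn x : List String) :
    (∃ i ∈ PySem.List.pyRange 0 ((cn.length : Int) + 1) 1,
        PySem.List.slice cn none (some i) = x) ↔ x <+: cn := by
  constructor
  · rintro ⟨i, hi, rfl⟩
    rw [PySem.List.mem_pyRange_one] at hi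
    rw [PySem.List.slice_to _ hi.1]
    exact List.take_prefix _ _
  · intro h
    refine ⟨(x.length : Int), ?_, ?_⟩
    · rw [PySem.List.mem_pyRange_one]
      have := h.length_le
      omega
    · rw [PySem.List.slice_to _ (by positivity)]
      simpa using (take_eq_iff_prefix x cn).2 h

theorem mem_pvIndex_full (C : List (List String)) (x : List String) :
    x ∈ (pvIndex C).1 ↔ ∃ c ∈ C, pvNorm c = x := by
  have key : ∀ (s1 s2 : PySem.Set (List String)),
      x ∈ (C.foldl (fun acc c =>
        (PySem.Set.add acc.1 (pvNorm c),
         (PySem.List.pyRange 0 (((pvNorm c).length : Int) + 1) 1).foldl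
            (fun s i => PySem.Set.add s (PySem.List.slice (pvNorm c) none (some i))) acc.2))
        (s1, s2)).1 ↔ x ∈ s1 ∨ ∃ c ∈ C, pvNorm c = x := by
    induction C with
    | nil => simp
    | cons c cs ih =>
        intro s1 s2
        simp only [List.foldl_cons]
        rw [ih]
        simp [PySem.Set.mem_add]
        tauto
  simpa [pvIndex] using key PySem.Set.empty PySem.Set.empty

theorem mem_pvIndex_prefixes (C : List (List String)) (x : List String) :
    x ∈ (pvIndex C).2 ↔ ∃ c ∈ C, x <+: pvNorm c := by
  have key : ∀ (s1 s2 : PySem.Set (List String)),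
      x ∈ (C.foldl (fun acc c =>
        (PySem.Set.add acc.1 (pvNorm c),
         (PySem.List.pyRange 0 (((pvNorm c).length : Int) + 1) 1).foldl
            (fun s i => PySem.Set.add s (PySem.List.slice (pvNorm c) none (some i))) acc.2))
        (s1, s2)).2 ↔ x ∈ s2 ∨ ∃ c ∈ C, x <+: pvNorm c := by
    induction C with
    | nil => simp
    | cons c cs ih =>
        intro s1 s2
        simp only [List.foldl_cons]
        rw [ih]
        rw [mem_foldl_add]
        rw [slice_prefix_iff]
        simp only [List.exists_mem_cons_iff]
        tauto
  simpa [pvIndex] using key PySem.Set.empty PySem.Set.empty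

-- A's per-pair test is exactly prefix-comparability of the normalizations
theorem A_cond_iff (t c : List String) :
    ((decide ((c.map PySem.Str.lower).length ≤ (t.map PySem.Str.lower).length) &&
        (PySem.List.slice (t.map PySem.Str.lower) none (some (((c.map PySem.Str.lower).length : Int))) == c.map PySem.Str.lower)) ||
     (decide ((t.map PySem.Str.lower).length ≤ (c.map PySem.Str.lower).length) &&
        (PySem.List.slice (c.map PySem.Str.lower) none (some (((t.map PySem.Str.lower).length : Int))) == t.map PySem.Str.lower))) = true
    ↔ (pvNorm c <+: pvNorm t ∨ pvNorm t <+: pvNorm c) := by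
  rw [PySem.List.slice_to _ (by positivity), PySem.List.slice_to _ (by positivity)]
  simp only [Bool.or_eq_true, Bool.and_eq_true, decide_eq_true_eq, beq_iff_eq, Int.toNat_natCast,
    pvNorm]
  constructor
  · rintro (⟨_, h⟩ | ⟨_, h⟩)
    · exact Or.inl ((take_eq_iff_prefix _ _).1 h)
    · exact Or.inr ((take_eq_iff_prefix _ _).1 h)
  · rintro (h | h)
    · exact Or.inl ⟨h.length_le, (take_eq_iff_prefix _ _).2 h⟩
    · exact Or.inr ⟨h.length_le, (take_eq_iff_prefix _ _).2 h⟩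

theorem A_iff (T C : List (List String)) :
    category_matches T C = true ↔
      ∃ t ∈ T, ∃ c ∈ C, (pvNorm c <+: pvNorm t ∨ pvNorm t <+: pvNorm c) := by
  simp only [category_matches, List.any_eq_true]
  refine exists_congr fun t => and_congr_right fun _ => exists_congr fun c =>
    and_congr_right fun _ => ?_
  exact A_cond_iff t c

theorem B_iff (T C : List (List String)) :
    category_matches_alt T C = true ↔
      ∃ t ∈ T, ∃ c ∈ C, (pvNorm c <+: pvNorm t ∨ pvNorm t <+: pvNorm c) := by
  simp only [category_matches_alt, List.any_eq_true, Bool.or_eq_true,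
    PySem.Set.contains_iff]
  refine exists_congr fun t => and_congr_right fun _ => ?_
  rw [mem_pvIndex_prefixes]
  constructor
  · rintro (⟨c, hc, hp⟩ | ⟨i, hi, hf⟩)
    · exact ⟨c, hc, Or.inr hp⟩
    · rw [mem_pvIndex_full] at hf
      obtain ⟨c, hc, hcn⟩ := hf
      refine ⟨c, hc, Or.inl ?_⟩
      rw [PySem.List.mem_pyRange_one] at hi
      rw [PySem.List.slice_to _ hi.1] at hcn
      exact hcn ▸ List.take_prefix _ _
  · rintro ⟨c, hc, h | h⟩
    · refine Or.inr ⟨((pvNorm c).length : Int), ?_, ?_⟩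
      · rw [PySem.List.mem_pyRange_one]
        have := h.length_le
        omega
      · rw [mem_pvIndex_full]
        refine ⟨c, hc, ?_⟩
        rw [PySem.List.slice_to _ (by positivity)]
        simpa using ((take_eq_iff_prefix _ _).2 h).symm
    · exact Or.inl ⟨c, hc, h⟩

-- ===== VERDICT (by name: the statement is the Claim_ definition above) =====
theorem category_matches_spec : Claim_equal_category_matches := by
  intro T C _
  unfold Spec_category_matches
  rw [Bool.eq_iff_iff, A_iff, B_iff]
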